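-- pv_equiv track=rewrite | github.com/longevity-genie/longevity_gpts | genetics/disgenet.py | _agragate_last_field
-- ===== SOURCE A (Python) =====
-- def _agragate_last_field(rows):
--     current = list(rows[0])
--     current[-1] = str(current[-1])
--     res:list = []
--     for row in rows[1:]:
--         row = list(row)
--         if current[:-1] != row[:-1]:
--             res.append(current)
--             current = row
--             current[-1] = str(current[-1])
--         else:
--             current[-1] += ", " + str(row[-1]).strip()
--
--     res.append(current)
--
--     return res
-- ===== SOURCE B (Python) =====
-- def _agragate_last_field(rows):
--     res = []
--     i, n = 0, len(rows)
--     while i < n: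
--         head = list(rows[i])
--         key = head[:-1]
--         j = i + 1
--         while j < n and list(rows[j])[:-1] == key:
--             j += 1
--         head[-1] = str(head[-1]) + "".join(
--             ", " + str(r[-1]).strip() for r in rows[i + 1:j])
--         res.append(head)
--         i = j
--     return res
-- ===== Notes on version B (the rewrite author's own statement) =====
-- stated objective: alternative
-- what changed: Replaces A's single pass with a mutable 'current' accumulator by a run-detection scan: for each group head it finds the boundary of the run of rows with the same prefix, then builds the merged row in one step by joining all stripped last fields of the run.
import Mathlib
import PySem

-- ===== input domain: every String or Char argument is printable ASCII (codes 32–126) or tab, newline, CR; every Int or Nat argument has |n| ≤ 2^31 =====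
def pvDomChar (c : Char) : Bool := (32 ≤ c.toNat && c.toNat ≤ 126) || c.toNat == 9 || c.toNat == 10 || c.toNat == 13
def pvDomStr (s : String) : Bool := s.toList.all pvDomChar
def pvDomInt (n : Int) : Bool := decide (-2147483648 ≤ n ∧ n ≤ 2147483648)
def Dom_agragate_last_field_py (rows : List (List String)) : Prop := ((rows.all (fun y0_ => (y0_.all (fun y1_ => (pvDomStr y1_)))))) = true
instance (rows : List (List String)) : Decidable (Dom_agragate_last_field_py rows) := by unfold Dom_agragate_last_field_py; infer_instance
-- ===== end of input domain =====

-- B builds each merged row in one step from a whole run of equal-prefix rows, instead of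
-- A's single pass mutating a 'current' accumulator (objective: alternative decomposition).

-- shared primitive: xs with its last element replaced by v (Python 'xs[-1] = v'; exact for xs ≠ [])
def pySetLast (xs : List String) (v : String) : List String := xs.dropLast ++ [v]

-- ===== PORT A =====
-- loop of A: state (current, res), iterating over the remaining rows
def aggLoopA : List (List String) → List String → List (List String) → List (List String)
  | [], current, res => res ++ [current]
  | row :: t, current, res =>
    if current.dropLast ≠ row.dropLast then
      aggLoopA t (pySetLast row (row.getLastD "")) (res ++ [current])
    else
      aggLoopA t (pySetLast current (current.getLastD "" ++ ", " ++ PySem.Str.strip (row.getLastD ""))) res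

-- str(s) on a string is the identity; 'current[-1] = str(current[-1])' is ported as pySetLast with the old last field
def agragate_last_field_py (rows : List (List String)) : List (List String) :=
  match rows with
  | [] => []   -- Python raises IndexError here (rows[0]); excluded by Pre_
  | r :: t => aggLoopA t (pySetLast r (r.getLastD "")) []

-- ===== PORT B =====
-- the "".join over the run's stripped last fields
def joinTails (run : List (List String)) : String :=
  String.join (run.map (fun r => ", " ++ PySem.Str.strip (r.getLastD "")))

-- B's outer loop: the inner index scan 'while j < n and rows[j][:-1] == key' computes exactly
-- the takeWhile/dropWhile split of the suffix after the head (exact port of the index arithmetic)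
def aggGroupsB : List (List String) → List (List String)
  | [] => []
  | head :: t =>
    pySetLast head (head.getLastD "" ++ joinTails (t.takeWhile (fun r => r.dropLast == head.dropLast)))
      :: aggGroupsB (t.dropWhile (fun r => r.dropLast == head.dropLast))
termination_by rows => rows.length
decreasing_by
  have := List.length_dropWhile_le (p := fun r => r.dropLast == head.dropLast) (l := t)
  simp only [List.length_cons]; omega

def agragate_last_field_py_alt (rows : List (List String)) : List (List String) :=
  aggGroupsB rows

-- ===== PRECONDITION & SPEC =====
-- Pre_ excludes exactly the inputs on which Python A raises IndexError: the empty list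
-- (rows[0]) and any input containing an empty row (current[-1] / row[-1]).
def Pre_agragate_last_field_py (rows : List (List String)) : Prop :=
  rows ≠ [] ∧ ∀ r ∈ rows, r ≠ []
instance (rows : List (List String)) : Decidable (Pre_agragate_last_field_py rows) := by
  unfold Pre_agragate_last_field_py; infer_instance

def pvWitness_agragate_last_field_py : List (List String) :=
  [["g1", "d", "x"], ["g1", "d", " y "], ["g2", "d", "z"]]

def Spec_agragate_last_field_py (rows : List (List String)) (out : List (List String)) : Prop := out = agragate_last_field_py_alt rows
instance (rows : List (List String)) (out : List (List String)) : Decidable (Spec_agragate_last_field_py rows out) := by unfold Spec_agragate_last_field_py; infer_instance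

-- ===== CLAIM (what is proved, stated in full; the proofs are below) =====
def Claim_equal_agragate_last_field_py : Prop := ∀ (rows : List (List String)), Dom_agragate_last_field_py rows → Pre_agragate_last_field_py rows → Spec_agragate_last_field_py rows (agragate_last_field_py rows)

-- ===== LEMMAS AND PROOFS =====

theorem pySetLast_ne_nil (xs : List String) (v : String) : pySetLast xs v ≠ [] := by
  simp [pySetLast]

theorem pySetLast_dropLast (xs : List String) (v : String) :
    (pySetLast xs v).dropLast = xs.dropLast := by
  simp [pySetLast]

theorem pySetLast_getLastD (xs : List String) (v : String) :
    (pySetLast xs v).getLastD "" = v := by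
  simp [pySetLast]

theorem pySetLast_self (xs : List String) (h : xs ≠ []) :
    pySetLast xs (xs.getLastD "") = xs := by
  have hg : xs.getLastD "" = xs.getLast h := by
    simp [List.getLastD_eq_getLast?, List.getLast?_eq_some_getLast h]
  rw [pySetLast, hg]
  exact List.dropLast_append_getLast h

-- shifting out the initial accumulator of the "".join fold
theorem self_eq_dropLast_append (xs : List String) (h : xs ≠ []) :
    xs.dropLast ++ [xs.getLast?.getD ""] = xs := by
  have := pySetLast_self xs h
  simpa [pySetLast, List.getLastD_eq_getLast?] using this

theorem foldl_append_shift (l : List String) :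
    ∀ s : String, List.foldl (fun r t => r ++ t) s l = s ++ List.foldl (fun r t => r ++ t) "" l := by
  induction l with
  | nil => intro s; simp
  | cons a l ih =>
    intro s
    simp only [List.foldl_cons]
    rw [ih (s ++ a), ih ("" ++ a)]
    simp [String.append_assoc]

theorem joinTails_cons (r : List String) (run : List (List String)) :
    joinTails (r :: run) = ", " ++ PySem.Str.strip (r.getLastD "") ++ joinTails run := by
  simp only [joinTails, List.map_cons, String.join]
  simp only [List.foldl_cons]
  rw [foldl_append_shift]
  simp [String.append_assoc]

-- main invariant of A's loop: from any nonempty 'current' it produces the merged run of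
-- 'current' with the matching prefix of t, followed by B's groups of the rest
theorem aggLoopA_eq (t : List (List String)) :
    ∀ (current : List String) (res : List (List String)), current ≠ [] →
    aggLoopA t current res =
      res ++ (pySetLast current (current.getLastD "" ++
                joinTails (t.takeWhile (fun r => r.dropLast == current.dropLast)))
        :: aggGroupsB (t.dropWhile (fun r => r.dropLast == current.dropLast))) := by
  induction t with
  | nil =>
    intro current res h
    show res ++ [current] = _
    rw [List.takeWhile_nil, List.dropWhile_nil, aggGroupsB]
    congr 2
    simp only [joinTails, List.map_nil, String.join, List.foldl_nil]
    rw [show current.getLastD "" ++ "" = current.getLastD "" from by simp]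
    exact (pySetLast_self current h).symm
  | cons row t ih =>
    intro current res h
    by_cases hp : current.dropLast = row.dropLast
    · have hb : (row.dropLast == current.dropLast) = true := by simp [hp]
      rw [show aggLoopA (row :: t) current res =
          aggLoopA t (pySetLast current (current.getLastD "" ++ ", " ++
            PySem.Str.strip (row.getLastD ""))) res by simp [aggLoopA, hp]]
      rw [ih _ res (pySetLast_ne_nil _ _)]
      rw [List.takeWhile_cons, List.dropWhile_cons]
      simp only [pySetLast_dropLast, pySetLast_getLastD, hb, if_pos]
      rw [joinTails_cons]
      congr 2
      simp [pySetLast, String.append_assoc]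
    · have hb : (row.dropLast == current.dropLast) = false := by
        simp; exact fun e => hp e.symm
      rw [show aggLoopA (row :: t) current res =
          aggLoopA t (pySetLast row (row.getLastD "")) (res ++ [current]) by
        simp [aggLoopA, hp]]
      rw [ih _ _ (pySetLast_ne_nil _ _)]
      rw [List.takeWhile_cons, List.dropWhile_cons]
      simp only [hb, Bool.false_eq_true, if_false]
      rw [aggGroupsB]
      simp only [pySetLast_dropLast, pySetLast_getLastD, List.append_assoc, List.cons_append,
        List.nil_append, joinTails, List.map_nil, String.join]
      congr 2
      · rw [show current.getLastD "" ++ List.foldl (fun r s => r ++ s) "" ([] : List String) =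
            current.getLastD "" from by simp]
        exact (pySetLast_self current h).symm
      · congr 1
        simp [pySetLast]

-- ===== VERDICT (by name: the statement is the Claim_ definition above) =====
theorem agragate_last_field_py_spec : Claim_equal_agragate_last_field_py := by
  intro rows _ hpre
  cases rows with
  | nil => exact absurd rfl hpre.1
  | cons r t =>
    have hr : r ≠ [] := hpre.2 r (by simp)
    show aggLoopA t (pySetLast r (r.getLastD "")) [] = aggGroupsB (r :: t)
    rw [aggLoopA_eq t _ [] (pySetLast_ne_nil _ _), aggGroupsB]
    simp only [pySetLast_dropLast, pySetLast_getLastD, List.nil_append]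
    congr 2
    simp [pySetLast, self_eq_dropLast_append r hr]
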